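-- pv_equiv track=rewrite | github.com/Philhobs/AI-PRED | ingestion/uspto_ingestion.py | _bucket_for_cpc
-- ===== SOURCE A (Python) =====
-- _PHYSICAL_AI_BUCKETS: dict[str, tuple[str, ...]] = {
--     "B25J":   ("B25J",),
--     "B64":    ("B64C", "B64U"),
--     "B60W":   ("B60W",),
--     "G05D1":  ("G05D1",),
--     "G05B19": ("G05B19",),
--     "G06V":   ("G06V",),
-- }
--
-- def _bucket_for_cpc(cpc_group: str) -> str | None:
--     """Return the bucket name for a cpc_group_id, or None if no match.
--
--     CPC classes look like 'G05D1/02' (main group + subgroup) or 'B25J9/02' (subclass + main group + subgroup).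
--     Strip the subgroup, then check if the head:
--       - Exactly matches a bucket prefix (main-group prefix like 'G05D1' matches only 'G05D1' / 'G05D1/02').
--       - Or starts with a subclass prefix (last char is a letter) followed by a digit
--         (so 'B25J' bucket matches all main groups B25J1, B25J9, B25J11, etc.).
--     """
--     head = cpc_group.split("/", 1)[0]   # 'G05D1/02' -> 'G05D1', 'B25J9' -> 'B25J9'
--     for bucket, prefixes in _PHYSICAL_AI_BUCKETS.items():
--         for p in prefixes:
--             if head == p:
--                 return bucket
--             if (
--                 not p[-1].isdigit()           # prefix is a subclass (e.g. B25J, B64C)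
--                 and head.startswith(p)
--                 and len(head) > len(p)
--                 and head[len(p)].isdigit()    # next char is a digit (a main group within the subclass)
--             ):
--                 return bucket
--     return None
-- ===== SOURCE B (Python) =====
-- _PHYSICAL_AI_BUCKETS: dict[str, tuple[str, ...]] = {
--     "B25J":   ("B25J",),
--     "B64":    ("B64C", "B64U"),
--     "B60W":   ("B60W",),
--     "G05D1":  ("G05D1",),
--     "G05B19": ("G05B19",),
--     "G06V":   ("G06V",),
-- }
--
-- # Flat lookup tables built once: prefix -> bucket for exact matches, and the
-- # letter-terminated (4-char) subclass prefixes for the "prefix + digit" rule.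
-- _EXACT = {p: b for b, ps in _PHYSICAL_AI_BUCKETS.items() for p in ps}
-- _SUBCLASS = {p: b for p, b in _EXACT.items() if not p[-1].isdigit()}
--
-- def _bucket_for_cpc(cpc_group: str) -> str | None:
--     head = cpc_group.split("/", 1)[0]
--     if head in _EXACT:
--         return _EXACT[head]
--     if len(head) > 4 and head[4].isdigit():
--         return _SUBCLASS.get(head[:4])
--     return None
-- ===== Notes on version B (the rewrite author's own statement) =====
-- stated objective: simpler
-- what changed: Replaces A's nested scan over the bucket table (with per-prefix subclass tests) by two dicts built once - an exact prefix-to-bucket map and a 4-char subclass map - so the lookup is head in exact, else subclass.get(head[:4]) guarded by len(head)>4 and head[4].isdigit().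
import Mathlib
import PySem

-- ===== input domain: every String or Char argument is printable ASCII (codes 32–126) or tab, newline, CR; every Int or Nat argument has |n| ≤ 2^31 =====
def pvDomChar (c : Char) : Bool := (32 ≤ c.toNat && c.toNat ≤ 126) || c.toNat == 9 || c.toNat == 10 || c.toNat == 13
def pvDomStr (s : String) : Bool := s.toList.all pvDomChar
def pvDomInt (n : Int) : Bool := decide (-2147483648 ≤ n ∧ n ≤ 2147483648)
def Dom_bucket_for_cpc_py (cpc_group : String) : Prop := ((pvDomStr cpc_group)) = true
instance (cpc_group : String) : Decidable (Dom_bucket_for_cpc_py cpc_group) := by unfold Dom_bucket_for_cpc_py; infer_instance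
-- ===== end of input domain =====

-- B replaces A's nested scan over the bucket table by two prefix→bucket dict lookups (exact, then 4-char subclass); objective: simpler.

-- head = cpc_group.split("/", 1)[0] — identical expression in A and B, shared helper.
-- splitMax? with a nonempty separator always returns `some` of a nonempty list, so the fallbacks are unreachable.
def pvHead (s : String) : String :=
  match PySem.Str.splitMax? s "/" 1 with
  | some (h :: _) => h
  | _ => ""

-- ===== PORT A =====
def pvBuckets : List (String × List String) :=
  [("B25J", ["B25J"]), ("B64", ["B64C", "B64U"]), ("B60W", ["B60W"]),
   ("G05D1", ["G05D1"]), ("G05B19", ["G05B19"]), ("G06V", ["G06V"])]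

-- inner loop over the prefixes of one bucket; p[-1].isdigit() via pyGet? (all table prefixes nonempty, so getD is never used)
def pvPrefLoop (head : String) (bucket : String) : List String → Option String
  | [] => none
  | p :: ps =>
    if head = p then some bucket
    else if (!(((PySem.Str.pyGet? p (-1)).map PySem.Chars.isdigit).getD true))
            && PySem.Str.startswith head p
            && decide (PySem.Str.len head > PySem.Str.len p)
            && (((PySem.Str.pyGet? head (PySem.Str.len p)).map PySem.Chars.isdigit).getD false)
    then some bucket
    else pvPrefLoop head bucket ps

def pvBucketLoop (head : String) : List (String × List String) → Option String
  | [] => none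
  | (bucket, prefixes) :: rest =>
    match pvPrefLoop head bucket prefixes with
    | some r => some r
    | none => pvBucketLoop head rest

def bucket_for_cpc_py (cpc_group : String) : Option String :=
  pvBucketLoop (pvHead cpc_group) pvBuckets

-- ===== PORT B =====
-- _EXACT = {p: b for b, ps in _PHYSICAL_AI_BUCKETS.items() for p in ps}
def pvExact : PySem.Dict String String :=
  pvBuckets.foldl (fun d bp => bp.2.foldl (fun d p => d.insert p bp.1) d) PySem.Dict.empty

-- _SUBCLASS = {p: b for p, b in _EXACT.items() if not p[-1].isdigit()}
def pvSubclass : PySem.Dict String String :=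
  PySem.Dict.ofList (pvExact.items.filter
    (fun pb => !(((PySem.Str.pyGet? pb.1 (-1)).map PySem.Chars.isdigit).getD true)))

def pvAltLookup (head : String) : Option String :=
  match pvExact.get? head with
  | some b => some b
  | none =>
    if decide (PySem.Str.len head > 4)
        && (((PySem.Str.pyGet? head 4).map PySem.Chars.isdigit).getD false)
    then pvSubclass.get? (PySem.Str.slice head none (some 4))
    else none

def bucket_for_cpc_py_alt (cpc_group : String) : Option String :=
  pvAltLookup (pvHead cpc_group)

-- ===== PRECONDITION & SPEC =====
def Spec_bucket_for_cpc_py (cpc_group : String) (out : Option String) : Prop := out = bucket_for_cpc_py_alt cpc_group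
instance (cpc_group : String) (out : Option String) : Decidable (Spec_bucket_for_cpc_py cpc_group out) := by unfold Spec_bucket_for_cpc_py; infer_instance

-- ===== CLAIM (what is proved, stated in full; the proofs are below) =====
def Claim_equal_bucket_for_cpc_py : Prop := ∀ (cpc_group : String), Dom_bucket_for_cpc_py cpc_group → Spec_bucket_for_cpc_py cpc_group (bucket_for_cpc_py cpc_group)

-- ===== LEMMAS AND PROOFS =====
theorem key4 (head p : String) (hp : p.toList.length = 4) :
    (p == PySem.Str.slice head none (some 4)) = PySem.Str.startswith head p := by
  have hs : (PySem.Str.slice head none (some 4)).toList = head.toList.take 4 := by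
    rw [PySem.Str.toList_slice]
    simpa using PySem.List.slice_to_natCast head.toList 4
  rw [Bool.eq_iff_iff]
  rw [beq_iff_eq, PySem.Str.startswith_eq, PySem.Chars.startswith_iff,
    List.prefix_iff_eq_take, hp]
  constructor
  · intro h; rw [← String.toList_inj] at h; rw [h, hs]
  · intro h; rw [← String.toList_inj, hs, h]

theorem pv_main (head : String) : pvBucketLoop head pvBuckets = pvAltLookup head := by
  by_cases h1 : head = "B25J"; · subst h1; decide
  by_cases h2 : head = "B64C"; · subst h2; decide
  by_cases h3 : head = "B64U"; · subst h3; decide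
  by_cases h4 : head = "B60W"; · subst h4; decide
  by_cases h5 : head = "G05D1"; · subst h5; decide
  by_cases h6 : head = "G05B19"; · subst h6; decide
  by_cases h7 : head = "G06V"; · subst h7; decide
  have n1 : ¬ ("B25J" = head) := fun e => h1 e.symm
  have n2 : ¬ ("B64C" = head) := fun e => h2 e.symm
  have n3 : ¬ ("B64U" = head) := fun e => h3 e.symm
  have n4 : ¬ ("B60W" = head) := fun e => h4 e.symm
  have n5 : ¬ ("G05D1" = head) := fun e => h5 e.symm
  have n6 : ¬ ("G05B19" = head) := fun e => h6 e.symm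
  have n7 : ¬ ("G06V" = head) := fun e => h7 e.symm
  have hE : pvExact = PySem.Dict.mk [("B25J","B25J"),("B64C","B64"),("B64U","B64"),("B60W","B60W"),("G05D1","G05D1"),("G05B19","G05B19"),("G06V","G06V")] := rfl
  have hS : pvSubclass = PySem.Dict.mk [("B25J","B25J"),("B64C","B64"),("B64U","B64"),("B60W","B60W"),("G06V","G06V")] := rfl
  simp only [pvBucketLoop, pvPrefLoop, pvBuckets, pvAltLookup, hE, hS,
    PySem.Dict.get?_mk_cons,
    key4 head "B25J" (by decide), key4 head "B64C" (by decide), key4 head "B64U" (by decide),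
    key4 head "B60W" (by decide), key4 head "G06V" (by decide)]
  simp only [show PySem.Str.len "B25J" = 4 from rfl, show PySem.Str.len "B64C" = 4 from rfl,
    show PySem.Str.len "B64U" = 4 from rfl, show PySem.Str.len "B60W" = 4 from rfl,
    show PySem.Str.len "G05D1" = 5 from rfl, show PySem.Str.len "G05B19" = 6 from rfl,
    show PySem.Str.len "G06V" = 4 from rfl]
  norm_num [h1, h2, h3, h4, h5, h6, h7, n1, n2, n3, n4, n5, n6, n7, beq_iff_eq]
  simp only [show (Option.map PySem.Chars.isdigit (PySem.List.pyGet? "B25J".toList (-1))).getD true = false from rfl,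
    show (Option.map PySem.Chars.isdigit (PySem.List.pyGet? "B64C".toList (-1))).getD true = false from rfl,
    show (Option.map PySem.Chars.isdigit (PySem.List.pyGet? "B64U".toList (-1))).getD true = false from rfl,
    show (Option.map PySem.Chars.isdigit (PySem.List.pyGet? "B60W".toList (-1))).getD true = false from rfl,
    show (Option.map PySem.Chars.isdigit (PySem.List.pyGet? "G06V".toList (-1))).getD true = false from rfl,
    show (Option.map PySem.Chars.isdigit (PySem.List.pyGet? "G05D1".toList (-1))).getD true = true from rfl,
    show (Option.map PySem.Chars.isdigit (PySem.List.pyGet? "G05B19".toList (-1))).getD true = true from rfl]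
  by_cases hL : 4 < head.length
  · have h4lt : 4 < head.toList.length := by simpa using hL
    by_cases hD : PySem.Chars.isdigit (head.toList[4]'h4lt) = true
    · simp [hL, hD]
      have hnone : ∀ x : String, (PySem.Dict.mk ([] : List (String × String))).get? x = none := fun _ => rfl
      rw [hnone, hnone]
      split_ifs <;> rfl
    · simp [hL, hD]
      rfl
  · simp [hL]
    rfl

-- ===== VERDICT (by name: the statement is the Claim_ definition above) =====
theorem bucket_for_cpc_py_spec : Claim_equal_bucket_for_cpc_py := by
  intro cpc_group _
  unfold Spec_bucket_for_cpc_py bucket_for_cpc_py bucket_for_cpc_py_alt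
  exact pv_main _
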